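-- pv_equiv track=rewrite | github.com/SemicolonUnexpected/project-euler | python/Problem_65.py | expand_continued_fraction
-- ===== SOURCE A (Python) =====
-- def expand_continued_fraction(iter, start=True):
-- 	if start:
-- 		n, d =  expand_continued_fraction(iter[1:], False)
-- 		return n + iter[0]*d, d
-- 	if len(iter) == 1:
-- 		return 1, iter[0]
-- 	n, d = expand_continued_fraction(iter[1:], False)
-- 	n, d = n + iter[0]*d, d
-- 	return d, n
-- ===== SOURCE B (Python) =====
-- def expand_continued_fraction(iter, start=True):
-- 	n, d = 1, iter[-1]
-- 	for a in reversed(iter[1:-1] if start else iter[:-1]):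
-- 		n, d = d, n + a * d
-- 	if start:
-- 		return n + iter[0] * d, d
-- 	return n, d
-- ===== Notes on version B (the rewrite author's own statement) =====
-- stated objective: faster
-- what changed: Replaces A's recursion with per-call list slicing by a single backward iterative pass maintaining the (numerator, denominator) pair; intended as faster (no repeated slicing, no deep recursion; measured 8.79x at the largest size both finished, unconfirmed beyond that where big-integer growth dominates both).
import Mathlib
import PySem

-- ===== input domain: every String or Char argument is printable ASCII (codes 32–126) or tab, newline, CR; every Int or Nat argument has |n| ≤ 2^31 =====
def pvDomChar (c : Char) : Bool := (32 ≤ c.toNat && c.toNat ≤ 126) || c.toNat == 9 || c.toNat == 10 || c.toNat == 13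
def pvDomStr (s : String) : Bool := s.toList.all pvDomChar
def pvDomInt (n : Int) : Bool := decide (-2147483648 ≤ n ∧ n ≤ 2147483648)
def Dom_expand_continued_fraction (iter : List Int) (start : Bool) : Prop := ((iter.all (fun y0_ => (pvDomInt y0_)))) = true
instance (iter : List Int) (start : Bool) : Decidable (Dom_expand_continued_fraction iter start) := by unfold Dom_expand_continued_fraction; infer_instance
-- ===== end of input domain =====

-- ===== PORT A =====
-- B replaces A's slicing recursion with one backward iterative pass (intended as faster;
-- measured 8.79x at the largest size where both finished).
-- A's infinite recursion (RecursionError) on iter=[] with start=False, and on singleton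
-- iter with start=True, is excluded by Pre_ (fuel exhaustion returns [] in the port there).
def ecfA : Nat → List Int → Bool → List Int
  | 0, _, _ => []
  | fuel+1, iter, true =>
      -- n, d = expand_continued_fraction(iter[1:], False); return n + iter[0]*d, d
      match ecfA fuel (iter.drop 1) false with
      | [n, d] => [n + iter.headI * d, d]
      | _ => []
  | fuel+1, iter, false =>
      if iter.length == 1 then [1, iter.headI]
      else
        match ecfA fuel (iter.drop 1) false with
        | [n, d] => [d, n + iter.headI * d]
        | _ => []

def expand_continued_fraction (iter : List Int) (start : Bool) : List Int :=
  ecfA (iter.length + 1) iter start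

-- ===== PORT B =====
def expand_continued_fraction_alt (iter : List Int) (start : Bool) : List Int :=
  match iter.getLast? with
  | none => []   -- iter[-1] raises IndexError in B: outside Pre_
  | some last =>
    -- n, d = 1, iter[-1]; for a in reversed(iter[1:-1] if start else iter[:-1]): n, d = d, n + a*d
    let mid : List Int := if start then (iter.drop 1).dropLast else iter.dropLast
    let nd : Int × Int :=
      mid.reverse.foldl (fun nd a => (nd.2, nd.1 + a * nd.2)) (1, last)
    if start then
      match iter with
      | [] => []
      | a0 :: _ => [nd.1 + a0 * nd.2, nd.2]
    else [nd.1, nd.2]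

-- ===== PRECONDITION & SPEC =====
-- Pre_ excludes exactly the inputs where A never returns (RecursionError): the empty list,
-- and a singleton list with start = true.
def Pre_expand_continued_fraction (iter : List Int) (start : Bool) : Prop :=
  1 ≤ iter.length ∧ (start = true → 2 ≤ iter.length)
instance (iter : List Int) (start : Bool) : Decidable (Pre_expand_continued_fraction iter start) := by
  unfold Pre_expand_continued_fraction; infer_instance

def pvWitness_expand_continued_fraction : List Int × Bool := ([2, 1, 2], true)

def Spec_expand_continued_fraction (iter : List Int) (start : Bool) (out : List Int) : Prop := out = expand_continued_fraction_alt iter start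
instance (iter : List Int) (start : Bool) (out : List Int) : Decidable (Spec_expand_continued_fraction iter start out) := by unfold Spec_expand_continued_fraction; infer_instance

-- ===== CLAIM (what is proved, stated in full; the proofs are below) =====
def Claim_equal_expand_continued_fraction : Prop := ∀ (iter : List Int) (start : Bool), Dom_expand_continued_fraction iter start → Pre_expand_continued_fraction iter start → Spec_expand_continued_fraction iter start (expand_continued_fraction iter start)

-- ===== LEMMAS AND PROOFS =====

-- the value B's backward fold computes on a nonempty list (helper for the proofs)
def bfold (iter : List Int) : Int × Int :=
  iter.dropLast.reverse.foldl (fun nd a => (nd.2, nd.1 + a * nd.2)) (1, iter.getLastI)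

lemma bfold_cons (a b : Int) (rs : List Int) :
    bfold (a :: b :: rs) =
      ((bfold (b :: rs)).2, (bfold (b :: rs)).1 + a * (bfold (b :: rs)).2) := by
  simp [bfold, List.foldl_append, List.getLastI_eq_getLast?_getD]

lemma ecfA_false (iter : List Int) (fuel : Nat) (h : iter ≠ []) (hf : iter.length ≤ fuel) :
    ecfA fuel iter false = [(bfold iter).1, (bfold iter).2] := by
  induction iter generalizing fuel with
  | nil => exact absurd rfl h
  | cons a rest ih =>
    cases fuel with
    | zero => simp at hf
    | succ f =>
      cases rest with
      | nil => simp [ecfA, bfold, List.getLastI]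
      | cons b rs =>
        have hlen : (b :: rs).length ≤ f := by
          simpa using Nat.succ_le_succ_iff.mp (by simpa using hf)
        have hrec := ih (by simp) (fuel := f) hlen
        simp only [ecfA, List.drop_one, List.tail_cons, bfold_cons]
        rw [hrec]
        simp

lemma getLast?_eq_getLastI (l : List Int) (h : l ≠ []) :
    l.getLast? = some l.getLastI := by
  cases l with
  | nil => exact absurd rfl h
  | cons x xs => simp [List.getLastI_eq_getLast?_getD, List.getLast?_eq_some_getLast (l := x :: xs) (by simp)]

-- ===== VERDICT (by name: the statement is the Claim_ definition above) =====
theorem expand_continued_fraction_spec : Claim_equal_expand_continued_fraction := by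
  intro iter start _ hpre
  unfold Spec_expand_continued_fraction
  obtain ⟨h1, h2⟩ := hpre
  cases start with
  | false =>
    have hne : iter ≠ [] := by cases iter <;> simp_all
    rw [show expand_continued_fraction iter false = ecfA (iter.length + 1) iter false from rfl,
        ecfA_false iter _ hne (by omega)]
    unfold expand_continued_fraction_alt
    rw [getLast?_eq_getLastI iter hne]
    simp [bfold]
  | true =>
    have h2' := h2 rfl
    obtain ⟨a, rest, rfl⟩ : ∃ a rest, iter = a :: rest := by
      cases iter with
      | nil => simp at h1
      | cons a rest => exact ⟨a, rest, rfl⟩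
    have hrne : rest ≠ [] := by cases rest <;> simp_all
    have hA : expand_continued_fraction (a :: rest) true =
        [(bfold rest).1 + a * (bfold rest).2, (bfold rest).2] := by
      unfold expand_continued_fraction
      simp only [ecfA, List.drop_one, List.tail_cons]
      rw [ecfA_false rest _ hrne (by simp)]
      simp
    rw [hA]
    unfold expand_continued_fraction_alt
    have hlast : (a :: rest).getLast? = some ((a :: rest).getLastI) :=
      getLast?_eq_getLastI _ (by simp)
    rw [hlast]
    have hgl : (a :: rest).getLastI = rest.getLastI := by
      cases rest with
      | nil => exact absurd rfl hrne
      | cons b rs => simp [List.getLastI_eq_getLast?_getD]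
    simp only [hgl, List.drop_one, List.tail_cons]
    simp [bfold]
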